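-- pv_equiv track=rewrite | github.com/Guipirod/gen-fw | evaluations.py | evaluate_500
-- ===== SOURCE A (Python) =====
-- def __bool_int(bitlist):
--     out = 0
--     for bit in bitlist:
--         out = (out << 1) | int(bit)
--     return out
--
-- def __bitlist_to_intlist(ilist, n):
--     # splits ilist on n intervals
--     divi = int(len(ilist) / n)
--     return [__bool_int(ilist[i * n:(i + 1) * n]) for i in range(divi)]
--
-- def evaluate_500(element):
--     negative = False
--     res = 0
--     for i in __bitlist_to_intlist(element, 20):
--         if negative:
--             res -= i
--         else:
--             res += i
--         negative = i % 2 != 0 or i > 2048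
--     return res
-- ===== SOURCE B (Python) =====
-- def evaluate_500(element):
--     # Chunk the stream 20 at a time via the iterator-zip idiom (drops the remainder),
--     # then use the identity: result = sum(chunks) - 2 * (sum of chunks whose
--     # predecessor is odd or > 2048) -- no sign state, no sign list.
--     chunks = []
--     for group in zip(*[iter(element)] * 20):
--         v = 0
--         for bit in group:
--             v = v * 2 | int(bit)
--         chunks.append(v)
--     penalty = sum(c for p, c in zip(chunks, chunks[1:]) if p % 2 or p > 2048)
--     return sum(chunks) - 2 * penalty
-- ===== Notes on version B (the rewrite author's own statement) =====
-- stated objective: alternative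
-- what changed: Eliminates A's carried 'negative' flag entirely: B chunks the stream with the iterator-zip idiom and computes the result by the algebraic identity sum(chunks) - 2*sum(chunks whose predecessor is odd or > 2048), a filter-and-sum over adjacent pairs instead of a sign state machine.
import Mathlib
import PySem

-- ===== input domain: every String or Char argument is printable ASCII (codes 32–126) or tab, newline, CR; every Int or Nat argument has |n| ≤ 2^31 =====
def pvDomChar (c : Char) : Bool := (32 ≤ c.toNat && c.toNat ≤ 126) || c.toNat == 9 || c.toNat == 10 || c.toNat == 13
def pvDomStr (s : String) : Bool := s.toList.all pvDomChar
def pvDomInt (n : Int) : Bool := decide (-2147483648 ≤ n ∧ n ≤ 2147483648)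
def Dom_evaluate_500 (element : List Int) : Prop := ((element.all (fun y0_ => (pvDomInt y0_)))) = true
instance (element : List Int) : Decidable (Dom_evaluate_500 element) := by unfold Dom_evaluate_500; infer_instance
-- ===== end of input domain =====

-- B drops A's carried sign flag entirely: it chunks the stream 20 at a time by repeated
-- take/drop (the iterator-zip idiom) and returns sum(chunks) - 2 * (sum of chunks whose
-- predecessor triggers the flag) — objective: alternative decomposition, same cost.

-- ===== PORT A =====
def pvBoolInt (bitlist : List Int) : Int :=
  bitlist.foldl (fun out bit => PySem.Int.bor (out <<< (1 : Nat)) bit) 0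

-- `int(len(ilist)/n)` : float true division then truncation; exact as floor division here
-- (list length ≥ 0 and far below the float-exactness bound).
def pvBitlistToIntlist (ilist : List Int) (n : Int) : List Int :=
  (PySem.List.pyRange 0 (PySem.Int.floordiv (ilist.length : Int) n) 1).map
    (fun i => pvBoolInt (PySem.List.slice ilist (some (i * n)) (some ((i + 1) * n))))

def evaluate_500 (element : List Int) : Int :=
  ((pvBitlistToIntlist element 20).foldl
    (fun st i =>
      (decide (PySem.Int.mod i 2 ≠ 0 ∨ i > 2048),
       if st.1 then st.2 - i else st.2 + i))
    (false, 0)).2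

-- ===== PORT B =====
-- `zip(*[iter(element)] * 20)`: successive groups of 20, remainder dropped
def altGroups (l : List Int) : List (List Int) :=
  if l.length < 20 then [] else l.take 20 :: altGroups (l.drop 20)
termination_by l.length
decreasing_by simp [List.length_drop]; omega

def evaluate_500_alt (element : List Int) : Int :=
  let chunks := (altGroups element).map
    (fun group => group.foldl (fun v bit => PySem.Int.bor (v * 2) bit) 0)
  let penalty := (((chunks.zip (PySem.List.slice chunks (some 1) none)).filter
      (fun p => decide (PySem.Int.mod p.1 2 ≠ 0 ∨ p.1 > 2048))).map (·.2)).sum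
  chunks.sum - 2 * penalty

-- ===== PRECONDITION & SPEC =====
def Spec_evaluate_500 (element : List Int) (out : Int) : Prop := out = evaluate_500_alt element
instance (element : List Int) (out : Int) : Decidable (Spec_evaluate_500 element out) := by unfold Spec_evaluate_500; infer_instance

-- ===== CLAIM (what is proved, stated in full; the proofs are below) =====
def Claim_equal_evaluate_500 : Prop := ∀ (element : List Int), Dom_evaluate_500 element → Spec_evaluate_500 element (evaluate_500 element)

-- ===== LEMMAS AND PROOFS =====

def pvTrig (c : Int) : Bool := decide (PySem.Int.mod c 2 ≠ 0 ∨ c > 2048)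

def pvHead0 : List Int → Int
  | [] => 0
  | c :: _ => c

def pvPen (cs : List Int) : Int :=
  (((cs.zip (cs.drop 1)).filter (fun p => pvTrig p.1)).map (·.2)).sum

lemma pvPen_cons (c : Int) (cs : List Int) :
    pvPen (c :: cs) = (if pvTrig c then pvHead0 cs else 0) + pvPen cs := by
  cases cs with
  | nil => simp [pvPen, pvHead0]
  | cons d ds =>
      simp only [pvPen, pvHead0, List.drop_one, List.tail_cons, List.zip_cons_cons,
        List.filter_cons]
      by_cases h : pvTrig c <;> simp [h]

lemma pvKey (cs : List Int) : ∀ (neg : Bool) (res : Int),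
    (cs.foldl
      (fun st i =>
        (decide (PySem.Int.mod i 2 ≠ 0 ∨ i > 2048),
         if st.1 then st.2 - i else st.2 + i)) (neg, res)).2
    = res + cs.sum - 2 * pvPen cs - (if neg then 2 * pvHead0 cs else 0) := by
  induction cs with
  | nil => intro neg res; cases neg <;> simp [pvPen, pvHead0]
  | cons c cs ih =>
      intro neg res
      simp only [List.foldl_cons]
      rw [ih]
      rw [pvPen_cons]
      show _ = res + (c :: cs).sum - _ - _
      simp only [List.sum_cons, pvHead0]
      have hd : decide (PySem.Int.mod c 2 ≠ 0 ∨ c > 2048) = pvTrig c := rfl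
      rw [hd]
      cases neg <;> cases htc : pvTrig c <;> simp <;> ring

lemma pvShiftMul (out bit : Int) :
    PySem.Int.bor (out <<< (1 : Nat)) bit = PySem.Int.bor (out * 2) bit := by
  have : out <<< (1 : Nat) = out * 2 := by
    rw [Int.shiftLeft_eq]; ring
  rw [this]

lemma pvSliceShift (l : List Int) (i : Int) (hi : 0 ≤ i) :
    PySem.List.slice l (some ((i + 1) * 20)) (some ((i + 2) * 20))
      = PySem.List.slice (l.drop 20) (some (i * 20)) (some ((i + 1) * 20)) := by
  rw [PySem.List.slice_toNat l (by omega) (by omega),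
      PySem.List.slice_toNat (l.drop 20) (by omega) (by omega)]
  rw [List.drop_drop]
  congr 1
  · omega
  · congr 1; omega

lemma pvGroupsEq (l : List Int) :
    (PySem.List.pyRange 0 (PySem.Int.floordiv (l.length : Int) 20) 1).map
      (fun i => PySem.List.slice l (some (i * 20)) (some ((i + 1) * 20)))
    = altGroups l := by
  by_cases h : l.length < 20
  · rw [altGroups]
    simp only [h, if_pos]
    have : PySem.Int.floordiv (l.length : Int) 20 = ((l.length / 20 : Nat) : Int) := by
      exact_mod_cast PySem.Int.floordiv_natCast l.length 20
    rw [this]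
    have h0 : (l.length / 20 : Nat) = 0 := by omega
    rw [h0]
    simp [PySem.List.pyRange_one_eq_nil]
  · rw [altGroups]
    simp only [h, if_neg, not_false_iff]
    have hfd : PySem.Int.floordiv (l.length : Int) 20 = ((l.length / 20 : Nat) : Int) := by
      exact_mod_cast PySem.Int.floordiv_natCast l.length 20
    have hpos : (0 : Int) < ((l.length / 20 : Nat) : Int) := by
      have : 1 ≤ l.length / 20 := by omega
      exact_mod_cast Nat.lt_of_lt_of_le Nat.zero_lt_one this
    rw [hfd, PySem.List.pyRange_one_cons hpos]
    simp only [List.map_cons]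
    have hhead : PySem.List.slice l (some ((0:Int) * 20)) (some (((0:Int) + 1) * 20))
        = l.take 20 := by
      rw [show ((0:Int) * 20) = 0 by ring, show (((0:Int)+1) * 20) = 20 by ring]
      rw [PySem.List.slice_toNat l (by omega) (by omega)]
      simp
    rw [hhead]
    congr 1
    -- tail: shift the index range by one and recurse on the dropped list
    have ih := pvGroupsEq (l.drop 20)
    have hlen : ((l.drop 20).length : Int) = (l.length : Int) - 20 := by
      simp [List.length_drop]; omega
    have hfd' : PySem.Int.floordiv ((l.drop 20).length : Int) 20
        = ((l.length / 20 : Nat) : Int) - 1 := by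
      have : PySem.Int.floordiv ((l.drop 20).length : Int) 20
          = (((l.drop 20).length / 20 : Nat) : Int) := by
        exact_mod_cast PySem.Int.floordiv_natCast (l.drop 20).length 20
      rw [this]
      have : (l.drop 20).length / 20 = l.length / 20 - 1 := by
        simp [List.length_drop]; omega
      rw [this]
      have h1 : 1 ≤ l.length / 20 := by omega
      push_cast [Nat.cast_sub h1]
      ring
    rw [hfd'] at ih
    rw [← ih]
    -- both sides are maps over ranges of equal length, shifted by 1
    rw [PySem.List.pyRange_one, PySem.List.pyRange_one]
    have hlen2 : ((((l.length / 20 : Nat) : Int)) - 1 - 0).toNat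
        = (((l.length / 20 : Nat) : Int) - 1).toNat := by omega
    rw [hlen2]
    rw [List.map_map, List.map_map]
    apply List.map_congr_left
    intro k _
    simp only [Function.comp]
    have hs := pvSliceShift l (k : Int) (Int.natCast_nonneg k)
    convert hs using 4 <;> ring
termination_by l.length
decreasing_by simp [List.length_drop]; omega

lemma pvChunksEq (l : List Int) :
    pvBitlistToIntlist l 20
    = (altGroups l).map (fun group => group.foldl (fun v bit => PySem.Int.bor (v * 2) bit) 0) := by
  unfold pvBitlistToIntlist pvBoolInt
  rw [← pvGroupsEq l, List.map_map]
  apply List.map_congr_left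
  intro i _
  simp only [Function.comp]
  congr 1
  funext out bit
  exact pvShiftMul out bit

lemma pvSliceOne (cs : List Int) : PySem.List.slice cs (some 1) none = cs.drop 1 := by
  rw [PySem.List.slice_from cs (by omega)]
  rfl

theorem evaluate_500_eq (element : List Int) :
    evaluate_500 element = evaluate_500_alt element := by
  unfold evaluate_500 evaluate_500_alt
  rw [pvChunksEq, pvKey]
  simp only [pvSliceOne, pvPen, pvTrig, pvHead0]
  norm_num

-- ===== VERDICT (by name: the statement is the Claim_ definition above) =====
theorem evaluate_500_spec : Claim_equal_evaluate_500 := by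
  intro element _
  unfold Spec_evaluate_500
  exact evaluate_500_eq element
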